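-- pv_equiv track=rewrite | github.com/DiabloCC/learning | data structure/PTASelfTest.py | DoubleNum
-- ===== SOURCE A (Python) =====
-- def DoubleNum(num):
--     s = sorted(str(num))
--     n = num*2
--     if num >= (10**(len(s)))//2:
--         return 'No', n
--     d = sorted(str(n))
--     for i in range(len(s)):
--         if s[i] != d[i]:
--             return 'No', n
--     return 'Yes', n
-- ===== SOURCE B (Python) =====
-- def DoubleNum(num):
--     n = num * 2
--     diff = {}
--     for c in str(num):
--         diff[c] = diff.get(c, 0) + 1
--     for c in str(n):
--         diff[c] = diff.get(c, 0) - 1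
--     if all(diff[c] == 0 for c in diff):
--         return 'Yes', n
--     return 'No', n
-- ===== Notes on version B (the rewrite author's own statement) =====
-- stated objective: simpler
-- what changed: B replaces A's sort-both-strings, magnitude guard and per-index prefix loop with a single digit-frequency dictionary (incremented over the characters of the original number's string, decremented over the doubled number's string) checked for all zeros; no sorting and no guard.
-- intended difference: On rare negative inputs where doubling gains an extra digit that is >= every character of the original string while the remaining digit multiset is unchanged (e.g. -871244 -> -1742488), A returns 'Yes' with the doubled value because its prefix loop never reaches the extra digit, while B returns 'No' with the doubled value, the intended answer since the doubled number is not a digit permutation of the original. — e.g. on DoubleNum(-871244): A returns ("Yes", -1742488), B returns ("No", -1742488)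
import Mathlib
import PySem

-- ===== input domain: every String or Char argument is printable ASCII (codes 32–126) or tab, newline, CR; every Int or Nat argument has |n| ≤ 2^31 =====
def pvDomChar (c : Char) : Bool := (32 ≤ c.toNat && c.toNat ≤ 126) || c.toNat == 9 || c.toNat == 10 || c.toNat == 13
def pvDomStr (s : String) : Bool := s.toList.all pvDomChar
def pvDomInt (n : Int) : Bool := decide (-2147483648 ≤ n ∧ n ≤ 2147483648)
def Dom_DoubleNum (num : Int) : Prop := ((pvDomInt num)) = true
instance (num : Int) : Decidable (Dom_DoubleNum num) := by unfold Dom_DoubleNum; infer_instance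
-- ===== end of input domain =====

-- B replaces A's sort-guard-and-compare with one pass of digit-count bookkeeping (simpler; and
-- it fixes A's spurious 'Yes' on rare negatives, stated in D_DoubleNum below).

-- ===== PORT A =====
-- `for i in range(len(s)): if s[i] != d[i]: return 'No', n` with early return;
-- pyGetD's default is never used: Python's indices here are always in range (len(str(2*num)) ≥ len(str(num))).
def DoubleNumLoopA (s d : List Char) : List Int → String
  | [] => "Yes"
  | i :: rest =>
    if PySem.List.pyGetD s i ' ' ≠ PySem.List.pyGetD d i ' ' then "No"
    else DoubleNumLoopA s d rest

def DoubleNum (num : Int) : String × Int :=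
  let s := PySem.List.sorted (PySem.Int.toChars num) (fun c => c) false
  let n := num * 2
  if PySem.Int.floordiv (10 ^ s.length) 2 ≤ num then ("No", n)
  else
    let d := PySem.List.sorted (PySem.Int.toChars n) (fun c => c) false
    (DoubleNumLoopA s d (PySem.List.pyRange 0 (s.length : Int) 1), n)

-- ===== PORT B =====
def DoubleNum_alt (num : Int) : String × Int :=
  let n := num * 2
  let diff1 := (PySem.Int.toChars num).foldl
    (fun d c => d.insert c (d.getD c 0 + 1)) (PySem.Dict.empty : PySem.Dict Char Int)
  let diff2 := (PySem.Int.toChars n).foldl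
    (fun d c => d.insert c (d.getD c 0 - 1)) diff1
  if diff2.keys.all (fun c => diff2.getD c 0 == 0) then ("Yes", n) else ("No", n)

-- ===== PRECONDITION & SPEC =====
-- On negatives where doubling gains a digit that is ≥ every character of str(num) and the remaining
-- digit multiset is unchanged, A returns 'Yes' (its sorted-prefix loop never sees the extra digit)
-- although 2*num is NOT a digit permutation of num; B returns 'No', the intended answer.
def D_DoubleNum (num : Int) : Prop :=
  num < 0 ∧ (PySem.Int.toChars (num * 2)).isPerm
    ((PySem.Int.toChars (num * 2)).foldl max '-' :: PySem.Int.toChars num) = true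
instance (num : Int) : Decidable (D_DoubleNum num) := by unfold D_DoubleNum; infer_instance

def Spec_DoubleNum (num : Int) (out : String × Int) : Prop := ¬ D_DoubleNum num → out = DoubleNum_alt num
instance (num : Int) (out : String × Int) : Decidable (Spec_DoubleNum num out) := by unfold Spec_DoubleNum; infer_instance

def pvDiffWitness_DoubleNum : Int := -871244
def pvDiffWitnessOut_DoubleNum : (String × Int) × (String × Int) := (("Yes", -1742488), ("No", -1742488))

-- ===== CLAIM (what is proved, stated in full; the proofs are below) =====
def Claim_unchanged_DoubleNum : Prop := ∀ (num : Int), Dom_DoubleNum num → Spec_DoubleNum num (DoubleNum num)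
def Claim_changed_DoubleNum : Prop := Dom_DoubleNum (pvDiffWitness_DoubleNum) ∧ D_DoubleNum (pvDiffWitness_DoubleNum) ∧ DoubleNum (pvDiffWitness_DoubleNum) = pvDiffWitnessOut_DoubleNum.1 ∧ DoubleNum_alt (pvDiffWitness_DoubleNum) = pvDiffWitnessOut_DoubleNum.2 ∧ pvDiffWitnessOut_DoubleNum.1 ≠ pvDiffWitnessOut_DoubleNum.2
def Claim_exact_DoubleNum : Prop := ∀ (num : Int), Dom_DoubleNum num → D_DoubleNum num → DoubleNum num ≠ DoubleNum_alt num

-- ===== LEMMAS AND PROOFS =====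

-- ## Decimal representation: Nat.toDigits 10 n is the reversed digit list of n

lemma toDigitsCore_eq_digits (fuel n : Nat) (ds : List Char) (hf : n ≤ fuel) (hn : 0 < n) :
    Nat.toDigitsCore 10 fuel n ds = ((Nat.digits 10 n).map Nat.digitChar).reverse ++ ds := by
  induction fuel generalizing n ds with
  | zero => omega
  | succ f ih =>
    show (if n / 10 = 0 then (n % 10).digitChar :: ds
          else Nat.toDigitsCore 10 f (n / 10) ((n % 10).digitChar :: ds)) = _
    by_cases h : n / 10 = 0
    · rw [if_pos h]
      have h10 : n < 10 := by omega
      rw [Nat.digits_def' (by norm_num) hn, Nat.div_eq_of_lt h10, Nat.digits_zero]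
      simp [Nat.mod_eq_of_lt h10]
    · rw [if_neg h]
      rw [ih (n / 10) _ (by omega) (Nat.pos_of_ne_zero h)]
      rw [Nat.digits_def' (by norm_num) hn]
      simp

lemma toDigits_eq_digits (n : Nat) (hn : 0 < n) :
    Nat.toDigits 10 n = ((Nat.digits 10 n).map Nat.digitChar).reverse := by
  rw [Nat.toDigits, toDigitsCore_eq_digits (n + 1) n [] (by omega) hn, List.append_nil]

lemma toDigits_length (n : Nat) (hn : 0 < n) :
    (Nat.toDigits 10 n).length = (Nat.digits 10 n).length := by
  rw [toDigits_eq_digits n hn]; simp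

lemma toDigits_length_le_iff (n k : Nat) (hk : 0 < k) :
    (Nat.toDigits 10 n).length ≤ k ↔ n < 10 ^ k := by
  rcases Nat.eq_zero_or_pos n with rfl | hn
  · have h1 : Nat.toDigits 10 0 = ['0'] := rfl
    rw [h1]
    simp only [List.length_singleton]
    exact iff_of_true hk (pow_pos (by norm_num) k)
  · rw [toDigits_length n hn]
    exact Nat.digits_length_le_iff (by norm_num) n

lemma toDigits_length_pos (n : Nat) : 0 < (Nat.toDigits 10 n).length := by
  rcases Nat.eq_zero_or_pos n with rfl | hn
  · have h1 : Nat.toDigits 10 0 = ['0'] := rfl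
    rw [h1]; norm_num
  · rw [toDigits_length n hn]
    simpa [List.length_pos_iff] using Nat.digits_ne_nil_iff_ne_zero.mpr (Nat.pos_iff_ne_zero.mp hn)

lemma toDigits_length_mono {a b : Nat} (h : a ≤ b) :
    (Nat.toDigits 10 a).length ≤ (Nat.toDigits 10 b).length := by
  have hb : b < 10 ^ (Nat.toDigits 10 b).length :=
    (toDigits_length_le_iff b _ (toDigits_length_pos b)).mp le_rfl
  exact (toDigits_length_le_iff a _ (toDigits_length_pos b)).mpr (lt_of_le_of_lt h hb)

-- ## toChars structure

lemma toChars_nonneg (num : Int) (h : 0 ≤ num) :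
    PySem.Int.toChars num = Nat.toDigits 10 num.toNat := by
  simp [PySem.Int.toChars, not_lt.mpr h]

lemma toChars_neg (num : Int) (h : num < 0) :
    PySem.Int.toChars num = '-' :: Nat.toDigits 10 num.natAbs := by
  simp [PySem.Int.toChars, h]

-- ## A's loop: 'Yes' iff the two sorted lists agree on every index below s.length

lemma loopA_yes_iff (s d : List Char) (j : Nat) :
    DoubleNumLoopA s d (PySem.List.pyRange (j : Int) (s.length : Int) 1) = "Yes" ↔
      ∀ i : Nat, j ≤ i → i < s.length → s.getD i ' ' = d.getD i ' ' := by
  by_cases hj : j < s.length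
  · rw [PySem.List.pyRange_one_cons (by exact_mod_cast hj), DoubleNumLoopA]
    have hcast : ((j : Int) + 1) = ((j + 1 : Nat) : Int) := by push_cast; ring
    rw [hcast]
    by_cases heq : PySem.List.pyGetD s (j : Int) ' ' = PySem.List.pyGetD d (j : Int) ' '
    · rw [if_neg (by simpa using heq), loopA_yes_iff s d (j + 1)]
      simp only [PySem.List.pyGetD_natCast] at heq
      constructor
      · intro h i hji hi
        rcases Nat.eq_or_lt_of_le hji with rfl | hlt
        · exact heq
        · exact h i hlt hi
      · intro h i hji hi
        exact h i (by omega) hi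
    · rw [if_pos (by simpa using heq)]
      simp only [PySem.List.pyGetD_natCast] at heq
      constructor
      · intro h; exact absurd h (by decide)
      · intro h; exact absurd (h j le_rfl hj) heq
  · have : PySem.List.pyRange (j : Int) (s.length : Int) 1 = [] := by
      simp [PySem.List.pyRange]; omega
    rw [this, DoubleNumLoopA]
    constructor
    · intro _ i hji hi; omega
    · intro _; rfl
termination_by s.length - j
decreasing_by omega

lemma getD_agree_iff_take (ss tt : List Char) (h : ss.length ≤ tt.length) :
    (∀ i : Nat, i < ss.length → ss.getD i ' ' = tt.getD i ' ') ↔ ss = tt.take ss.length := by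
  constructor
  · intro hagree
    apply List.ext_getElem?
    intro i
    by_cases hi : i < ss.length
    · have h2 : i < tt.length := by omega
      have := hagree i hi
      rw [List.getD_eq_getElem?_getD, List.getD_eq_getElem?_getD,
        List.getElem?_eq_getElem hi, List.getElem?_eq_getElem h2] at this
      simp only [Option.getD_some] at this
      rw [List.getElem?_eq_getElem hi, List.getElem?_take, if_pos hi,
        List.getElem?_eq_getElem h2, this]
    · rw [List.getElem?_eq_none (by omega), List.getElem?_take, if_neg hi]
  · intro heq i hi
    have h2 : i < tt.length := by omega
    rw [List.getD_eq_getElem?_getD, List.getD_eq_getElem?_getD, heq,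
      List.getElem?_take, if_pos hi]

-- ## B: the final dict maps each character to count in str(num) minus count in str(2*num)

lemma getD_foldl_insert_sub_one (l : List Char) (d : PySem.Dict Char Int) (v : Char) :
    (l.foldl (fun d x => d.insert x (d.getD x 0 - 1)) d).getD v 0 = d.getD v 0 - l.count v := by
  induction l generalizing d with
  | nil => simp
  | cons x xs ih =>
    rw [List.foldl_cons, ih, PySem.Dict.getD_insert, List.count_cons]
    by_cases hv : v = x
    · subst hv; simp only [beq_self_eq_true, if_pos]
      push_cast; ring
    · rw [if_neg hv, if_neg (by simp [Ne.symm hv])]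
      push_cast; ring

lemma B_yes_iff (num : Int) :
    (DoubleNum_alt num).1 = "Yes" ↔
      (PySem.Int.toChars num).Perm (PySem.Int.toChars (num * 2)) := by
  unfold DoubleNum_alt
  simp only
  rw [PySem.Dict.foldl_insert_getD_add_one_eq_counter]
  set s := PySem.Int.toChars num with hs
  set t := PySem.Int.toChars (num * 2) with ht
  set D := t.foldl (fun d c => d.insert c (d.getD c 0 - 1)) (PySem.Dict.counter s) with hD
  have hgetD : ∀ v, D.getD v 0 = (s.count v : Int) - t.count v := by
    intro v
    rw [hD, getD_foldl_insert_sub_one, PySem.Dict.getD_counter]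
  have hkeys : ∀ v : Char, v ∈ D.keys ↔ v ∈ s ∨ v ∈ t := by
    intro v
    rw [hD, PySem.Dict.keys_foldl_insert (f := fun d c => d.getD c 0 - 1),
      PySem.Set.mem_update, PySem.Dict.keys_counter, PySem.Set.mem_ofList]
  have hiff : (D.keys.all fun c => D.getD c 0 == 0) = true ↔ s.Perm t := by
    rw [List.all_eq_true, List.perm_iff_count]
    constructor
    · intro h v
      by_cases hv : v ∈ D.keys
      · have h0 := h v hv
        simp only [beq_iff_eq, hgetD] at h0
        omega
      · have hvs : v ∉ s := fun hm => hv ((hkeys v).mpr (Or.inl hm))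
        have hvt : v ∉ t := fun hm => hv ((hkeys v).mpr (Or.inr hm))
        rw [List.count_eq_zero_of_not_mem hvs, List.count_eq_zero_of_not_mem hvt]
    · intro h v _
      have := h v
      simp only [beq_iff_eq, hgetD]
      omega
  by_cases hok : (D.keys.all fun c => D.getD c 0 == 0) = true
  · rw [if_pos hok]
    simpa using hiff.mp hok
  · rw [if_neg hok]
    constructor
    · intro h; simp at h
    · intro h; exact absurd (hiff.mpr h) hok

-- ## A: full characterisation of the first component

lemma A_fst (num : Int) (hguard : ¬ PySem.Int.floordiv (10 ^ (PySem.Int.toChars num).length) 2 ≤ num)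
    (hlen : (PySem.Int.toChars num).length ≤ (PySem.Int.toChars (num * 2)).length) :
    DoubleNum num = (if PySem.List.sorted (PySem.Int.toChars num) (fun c => c) false =
      (PySem.List.sorted (PySem.Int.toChars (num * 2)) (fun c => c) false).take (PySem.Int.toChars num).length
      then "Yes" else "No", num * 2) := by
  have hl1 : (PySem.List.sorted (PySem.Int.toChars num) (fun c => c) false).length =
      (PySem.Int.toChars num).length := PySem.List.length_sorted _ _ _
  show (if PySem.Int.floordiv
        (10 ^ (PySem.List.sorted (PySem.Int.toChars num) (fun c => c) false).length) 2 ≤ num then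
      (("No" : String), num * 2)
    else
      (DoubleNumLoopA (PySem.List.sorted (PySem.Int.toChars num) (fun c => c) false)
        (PySem.List.sorted (PySem.Int.toChars (num * 2)) (fun c => c) false)
        (PySem.List.pyRange 0 ((PySem.List.sorted (PySem.Int.toChars num) (fun c => c) false).length : Int) 1),
        num * 2)) = _
  set ss := PySem.List.sorted (PySem.Int.toChars num) (fun c => c) false with hss
  set tt := PySem.List.sorted (PySem.Int.toChars (num * 2)) (fun c => c) false with htt
  have hguard' : ¬ PySem.Int.floordiv (10 ^ ss.length) 2 ≤ num := by rw [hl1]; exact hguard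
  rw [if_neg hguard']
  have hl2 : tt.length = (PySem.Int.toChars (num * 2)).length := PySem.List.length_sorted _ _ _
  have hle : ss.length ≤ tt.length := by omega
  have hyes : DoubleNumLoopA ss tt
      (PySem.List.pyRange ((0 : Nat) : Int) ((ss.length : Nat) : Int) 1) = "Yes" ↔
      ss = tt.take ss.length := by
    rw [loopA_yes_iff, ← getD_agree_iff_take ss tt hle]
    constructor
    · intro h i hi; exact h i (Nat.zero_le i) hi
    · intro h i _ hi; exact h i hi
  have h0 : ((0 : Int)) = ((0 : Nat) : Int) := rfl
  rw [h0]
  rw [← hl1]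
  split_ifs with hk
  · rw [Prod.mk.injEq]
    exact ⟨hyes.mpr hk, rfl⟩
  · have hall : ∀ (l : List Int), DoubleNumLoopA ss tt l = "Yes" ∨ DoubleNumLoopA ss tt l = "No" := by
      intro l
      induction l with
      | nil => left; rfl
      | cons x xs ih =>
        rw [DoubleNumLoopA]; split_ifs with h
        · right; rfl
        · exact ih
    rcases hall (PySem.List.pyRange ((0 : Nat) : Int) (ss.length : Int) 1) with h | h
    · exact absurd (hyes.mp h) hk
    · rw [Prod.mk.injEq]
      exact ⟨h, rfl⟩

-- ## length bridge: characters and the guard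

lemma guard_iff (num : Int) (k : Nat) (hk : 0 < k) :
    PySem.Int.floordiv (10 ^ k) 2 ≤ num ↔ 10 ^ k ≤ 2 * num := by
  have h2 : (0 : Int) < 2 := by norm_num
  have heven : (10 : Int) ^ k = 2 * (5 * 10 ^ (k - 1)) := by
    have h10 : (10 : Int) ^ k = 10 * 10 ^ (k - 1) := by
      conv_lhs => rw [show k = 1 + (k - 1) by omega]
      rw [pow_add, pow_one]
    rw [h10]; ring
  have key : num + 1 ≤ PySem.Int.floordiv (10 ^ k) 2 ↔ (num + 1) * 2 ≤ 10 ^ k :=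
    PySem.Int.le_floordiv_iff_mul_le h2
  constructor
  · intro h
    have h2' : ¬ ((num + 1) * 2 ≤ 10 ^ k) := fun hx => by have := key.mpr hx; omega
    omega
  · intro h
    by_contra hc
    have hx := key.mp (by omega)
    omega

-- ===== main proof =====

lemma sorted_append_max (s : List Char) (c : Char) (hmax : ∀ x ∈ s, x ≤ c) :
    PySem.List.sorted (c :: s) (fun x => x) false =
      PySem.List.sorted s (fun x => x) false ++ [c] := by
  apply PySem.List.sorted_id_eq_of_perm_of_pairwise
  · exact ((PySem.List.sorted_perm s _ false).append_right [c]).trans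
      (List.perm_append_singleton c s)
  · rw [List.pairwise_append]
    refine ⟨PySem.List.sorted_pairwise s (fun x => x), List.pairwise_singleton _ _, ?_⟩
    intro x hx y hy
    rw [List.mem_singleton] at hy; subst hy
    exact hmax x ((PySem.List.mem_sorted s _ false x).mp hx)

lemma D_iff (num : Int) :
    D_DoubleNum num ↔ num < 0 ∧ ∃ c ∈ PySem.Int.toChars (num * 2),
      (∀ c' ∈ PySem.Int.toChars num, c' ≤ c) ∧
        (PySem.Int.toChars (num * 2)).Perm (c :: PySem.Int.toChars num) := by
  unfold D_DoubleNum
  rw [List.isPerm_iff]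
  set t := PySem.Int.toChars (num * 2) with htdef
  constructor
  · rintro ⟨hneg, hperm⟩
    have hdash : '-' ∈ t := by
      rw [htdef, toChars_neg (num * 2) (by omega)]; exact List.mem_cons_self
    have hct : t.foldl max '-' ∈ t := by
      rcases PySem.List.foldl_max_mem t '-' with h | h
      · rw [h]; exact hdash
      · exact h
    refine ⟨hneg, t.foldl max '-', hct, ?_, hperm⟩
    intro c' hc'
    exact (PySem.List.le_foldl_max t '-').2 c' (hperm.mem_iff.mpr (List.mem_cons_of_mem _ hc'))
  · rintro ⟨hneg, c, hct, hmax, hperm⟩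
    have hdash : '-' ∈ t := by
      rw [htdef, toChars_neg (num * 2) (by omega)]; exact List.mem_cons_self
    have h1 : t.foldl max '-' ∈ t := by
      rcases PySem.List.foldl_max_mem t '-' with h | h
      · rw [h]; exact hdash
      · exact h
    have h3 : ∀ y ∈ t, y ≤ c := by
      intro y hy
      rcases List.mem_cons.mp (hperm.mem_iff.mp hy) with rfl | hys
      · exact le_rfl
      · exact hmax y hys
    have hc2 : t.foldl max '-' = c :=
      le_antisymm (h3 _ h1) ((PySem.List.le_foldl_max t '-').2 c hct)
    exact ⟨hneg, hc2 ▸ hperm⟩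

lemma B_snd (num : Int) : (DoubleNum_alt num).2 = num * 2 := by
  unfold DoubleNum_alt; simp only; split_ifs <;> rfl

lemma B_eq_yes {num : Int} (h : (PySem.Int.toChars num).Perm (PySem.Int.toChars (num * 2))) :
    DoubleNum_alt num = ("Yes", num * 2) := by
  refine Prod.ext ?_ (B_snd num)
  exact (B_yes_iff num).mpr h

lemma B_eq_no {num : Int} (h : ¬ (PySem.Int.toChars num).Perm (PySem.Int.toChars (num * 2))) :
    DoubleNum_alt num = ("No", num * 2) := by
  refine Prod.ext ?_ (B_snd num)
  have hne : (DoubleNum_alt num).1 ≠ "Yes" := fun hy => h ((B_yes_iff num).mp hy)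
  unfold DoubleNum_alt at *
  simp only at hne ⊢
  split_ifs at hne ⊢ with hc
  · exact absurd rfl hne
  · rfl

lemma A_guard {num : Int}
    (hG : PySem.Int.floordiv (10 ^ (PySem.Int.toChars num).length) 2 ≤ num) :
    DoubleNum num = ("No", num * 2) := by
  have hl1 : (PySem.List.sorted (PySem.Int.toChars num) (fun c => c) false).length =
      (PySem.Int.toChars num).length := PySem.List.length_sorted _ _ _
  show (if PySem.Int.floordiv
        (10 ^ (PySem.List.sorted (PySem.Int.toChars num) (fun c => c) false).length) 2 ≤ num then
      (("No" : String), num * 2)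
    else _) = _
  rw [hl1, if_pos hG]

-- length of toChars of a doubled nonnegative / negative number, versus the guard
lemma cast_pow10 (k : Nat) : ((10 ^ k : Nat) : Int) = 10 ^ k := by push_cast; ring

lemma unchanged_main (num : Int) (hnD : ¬ D_DoubleNum num) : DoubleNum num = DoubleNum_alt num := by
  by_cases hneg : num < 0
  case neg =>
    -- num ≥ 0
    have h0 : 0 ≤ num := not_lt.mp hneg
    have hs : PySem.Int.toChars num = Nat.toDigits 10 num.toNat := toChars_nonneg num h0
    have ht : PySem.Int.toChars (num * 2) = Nat.toDigits 10 (2 * num.toNat) := by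
      rw [toChars_nonneg (num * 2) (by omega)]
      congr 1; omega
    set k := (PySem.Int.toChars num).length with hk
    have hkpos : 0 < k := by rw [hk, hs]; exact toDigits_length_pos _
    by_cases hG : PySem.Int.floordiv (10 ^ k) 2 ≤ num
    · -- guard fires: the doubled number has strictly more digits, so no permutation either
      have h2 : (10 : Int) ^ k ≤ 2 * num := (guard_iff num k hkpos).mp hG
      have h2n : 10 ^ k ≤ 2 * num.toNat := by
        have := cast_pow10 k; omega
      have hlt : k < (PySem.Int.toChars (num * 2)).length := by
        rw [ht]
        by_contra hle
        have := (toDigits_length_le_iff (2 * num.toNat) k hkpos).mp (by omega)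
        omega
      have hnp : ¬ (PySem.Int.toChars num).Perm (PySem.Int.toChars (num * 2)) := by
        intro hp; have := hp.length_eq; omega
      rw [A_guard hG, B_eq_no hnp]
    · -- guard does not fire: same number of characters, sorted equality = permutation
      have h2 : ¬ (10 : Int) ^ k ≤ 2 * num := fun h => hG ((guard_iff num k hkpos).mpr h)
      have h2n : 2 * num.toNat < 10 ^ k := by
        have := cast_pow10 k; omega
      have hlen : (PySem.Int.toChars (num * 2)).length = k := by
        rw [ht]
        have hub := (toDigits_length_le_iff (2 * num.toNat) k hkpos).mpr h2n
        have hlb : k ≤ (Nat.toDigits 10 (2 * num.toNat)).length := by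
          rw [hk, hs]; exact toDigits_length_mono (by omega)
        omega
      rw [A_fst num hG (by omega)]
      set ss := PySem.List.sorted (PySem.Int.toChars num) (fun c => c) false with hss
      set tt := PySem.List.sorted (PySem.Int.toChars (num * 2)) (fun c => c) false with htt
      have httlen : tt.length = k := by rw [htt, PySem.List.length_sorted]; exact hlen
      have htake : tt.take k = tt := by
        conv_lhs => rw [← httlen]
        exact List.take_length
      rw [htake]
      by_cases hp : (PySem.Int.toChars num).Perm (PySem.Int.toChars (num * 2))
      · rw [if_pos ((PySem.List.sorted_id_eq_sorted_id_iff_perm _ _).mpr hp), B_eq_yes hp]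
      · rw [if_neg (fun h => hp ((PySem.List.sorted_id_eq_sorted_id_iff_perm _ _).mp h)),
          B_eq_no hp]
  case pos =>
    -- num < 0
    set m := num.natAbs with hm
    have hmpos : 0 < m := by omega
    have hs : PySem.Int.toChars num = '-' :: Nat.toDigits 10 m := toChars_neg num hneg
    have ht : PySem.Int.toChars (num * 2) = '-' :: Nat.toDigits 10 (2 * m) := by
      rw [toChars_neg (num * 2) (by omega)]
      congr 2
      rw [Int.natAbs_mul]
      simp [hm, Nat.mul_comm]
    set k := (PySem.Int.toChars num).length with hk
    have hkpos : 0 < k := by rw [hk, hs]; simp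
    have hG : ¬ PySem.Int.floordiv (10 ^ k) 2 ≤ num := by
      intro h
      have := (guard_iff num k hkpos).mp h
      have hp10 : (0 : Int) < 10 ^ k := pow_pos (by norm_num) k
      omega
    have hmono : (Nat.toDigits 10 m).length ≤ (Nat.toDigits 10 (2 * m)).length :=
      toDigits_length_mono (by omega)
    have hlen : k ≤ (PySem.Int.toChars (num * 2)).length := by
      rw [hk, hs, ht]; simpa using hmono
    rw [A_fst num hG hlen]
    set ss := PySem.List.sorted (PySem.Int.toChars num) (fun c => c) false with hss
    set tt := PySem.List.sorted (PySem.Int.toChars (num * 2)) (fun c => c) false with htt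
    have hsslen : ss.length = k := by rw [hss, PySem.List.length_sorted]
    have httlen : tt.length = (PySem.Int.toChars (num * 2)).length := by
      rw [htt, PySem.List.length_sorted]
    by_cases hEq : (PySem.Int.toChars (num * 2)).length = k
    · -- equal lengths: sorted-prefix comparison is full equality, i.e. permutation
      have htake : tt.take k = tt := by
        conv_lhs => rw [← show tt.length = k by omega]
        exact List.take_length
      rw [htake]
      by_cases hp : (PySem.Int.toChars num).Perm (PySem.Int.toChars (num * 2))
      · rw [if_pos ((PySem.List.sorted_id_eq_sorted_id_iff_perm _ _).mpr hp), B_eq_yes hp]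
      · rw [if_neg (fun h => hp ((PySem.List.sorted_id_eq_sorted_id_iff_perm _ _).mp h)),
          B_eq_no hp]
    · -- doubling gained a digit: lengths differ, no permutation; outside D_ the prefix differs too
      have hgain : (PySem.Int.toChars (num * 2)).length = k + 1 := by
        -- at most one digit is gained: 2*m < 10 * m ≤ 10^(L m + 1)
        have hub : (Nat.toDigits 10 (2 * m)).length ≤ (Nat.toDigits 10 m).length + 1 := by
          have h1 : m < 10 ^ (Nat.toDigits 10 m).length :=
            (toDigits_length_le_iff m _ (toDigits_length_pos m)).mp le_rfl
          refine (toDigits_length_le_iff (2 * m) _ (by omega)).mpr ?_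
          have : (10 : Nat) ^ ((Nat.toDigits 10 m).length + 1) =
              10 * 10 ^ (Nat.toDigits 10 m).length := by ring
          omega
        have e1 : (PySem.Int.toChars (num * 2)).length = (Nat.toDigits 10 (2 * m)).length + 1 := by
          rw [ht]; simp
        have e2 : k = (Nat.toDigits 10 m).length + 1 := by rw [hk, hs]; simp
        omega
      have hnp : ¬ (PySem.Int.toChars num).Perm (PySem.Int.toChars (num * 2)) := by
        intro hp; have := hp.length_eq; omega
      have hcond : ¬ ss = tt.take ss.length := by
        intro hcondeq
        -- from a matching prefix we would land exactly in D_DoubleNum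
        apply hnD
        rw [D_iff]
        refine ⟨hneg, ?_⟩
        have httlen' : tt.length = k + 1 := by omega
        have hdroplen : (tt.drop k).length = 1 := by rw [List.length_drop]; omega
        obtain ⟨c, hc⟩ := List.length_eq_one_iff.mp hdroplen
        have hsplit : tt = ss ++ [c] := by
          conv_lhs => rw [← List.take_append_drop k tt]
          rw [hc, ← hsslen, ← hcondeq]
        refine ⟨c, ?_, ?_, ?_⟩
        · have : c ∈ tt := by rw [hsplit]; simp
          exact (PySem.List.mem_sorted _ _ _ c).mp this
        · intro c' hc'
          have hc'ss : c' ∈ ss := (PySem.List.mem_sorted _ _ _ c').mpr hc'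
          have hpw := PySem.List.sorted_pairwise (PySem.Int.toChars (num * 2)) (fun c => c)
          rw [← htt, hsplit, List.pairwise_append] at hpw
          exact hpw.2.2 c' hc'ss c (List.mem_singleton_self c)
        · have p1 : (PySem.Int.toChars (num * 2)).Perm tt := (PySem.List.sorted_perm _ _ _).symm
          have p2 : (ss ++ [c]).Perm (c :: ss) := List.perm_append_singleton c ss
          have p3 : (c :: ss).Perm (c :: PySem.Int.toChars num) :=
            (PySem.List.sorted_perm _ _ _).cons c
          exact ((p1.trans (hsplit ▸ List.Perm.refl tt)).trans p2).trans p3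
      rw [if_neg (by rw [hsslen] at hcond; exact hcond), B_eq_no hnp]

lemma tight_main (num : Int) (hD : D_DoubleNum num) : DoubleNum num ≠ DoubleNum_alt num := by
  rw [D_iff] at hD
  obtain ⟨hneg, c, hct, hmax, hperm⟩ := hD
  set s := PySem.Int.toChars num with hsdef
  set t := PySem.Int.toChars (num * 2) with htdef
  have hlen : t.length = s.length + 1 := by rw [hperm.length_eq]; simp
  have hkpos : 0 < s.length := by
    rw [hsdef, toChars_neg num hneg]; simp
  have hG : ¬ PySem.Int.floordiv (10 ^ s.length) 2 ≤ num := by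
    intro h
    have := (guard_iff num s.length hkpos).mp h
    have hp10 : (0 : Int) < 10 ^ s.length := pow_pos (by norm_num) s.length
    omega
  have hle : (PySem.Int.toChars num).length ≤ (PySem.Int.toChars (num * 2)).length := by
    rw [← hsdef, ← htdef]; omega
  have hA := A_fst num hG hle
  have hsorted : PySem.List.sorted t (fun c => c) false =
      PySem.List.sorted s (fun c => c) false ++ [c] := by
    have h1 : PySem.List.sorted t (fun c => c) false =
        PySem.List.sorted (c :: s) (fun c => c) false :=
      (PySem.List.sorted_id_eq_sorted_id_iff_perm t (c :: s)).mpr hperm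
    rw [h1]
    exact sorted_append_max s c hmax
  have htake : (PySem.List.sorted t (fun c => c) false).take s.length =
      PySem.List.sorted s (fun c => c) false := by
    rw [hsorted, ← PySem.List.length_sorted s (fun c => c) false, List.take_left]
  rw [← hsdef, ← htdef] at hA
  rw [hA, htake, if_pos rfl]
  have hnp : ¬ s.Perm t := fun hp => by have := hp.length_eq; omega
  rw [B_eq_no (by rw [← hsdef, ← htdef]; exact hnp)]
  intro h
  have := congrArg Prod.fst h
  simp at this

-- ===== VERDICT (by name: the statement is the Claim_ definition above) =====
theorem DoubleNum_spec : Claim_unchanged_DoubleNum := by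
  intro num _ hnD
  exact (unchanged_main num hnD).symm ▸ rfl

set_option maxRecDepth 40000 in
theorem DoubleNum_changed : Claim_changed_DoubleNum := by
  unfold Claim_changed_DoubleNum; decide

theorem DoubleNum_tight : Claim_exact_DoubleNum := by
  intro num _ hD
  exact tight_main num hD
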